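-- pv_equiv track=rewrite | github.com/wherby/code | contest/00000c315d89/c317/q2/t2.py | mostPopularCreator
-- ===== SOURCE A (Python) =====
-- from typing import List, Tuple, Optional
-- from collections import defaultdict,deque
--
-- def mostPopularCreator(creators: List[str], ids: List[str], views: List[int]) -> List[List[str]]:
--     n = len(creators)
--     dic = defaultdict(int)
--     dic2 = {}
--     for i in range(n):
--         c = creators[i]
--         id = ids[i]
--         v = views[i]
--         dic[c] += v
--         if c not in dic2:
--             dic2[c] = (v,id)
--         else:
--             vt,idv = dic2[c]
--             if vt <v :
--                 dic2[c] = (v,id)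
--             elif vt == v and idv> id:
--                 dic2[c] = (v,id)
--     mx = 0
--     cls = []
--     vmax = max(dic.values())
--     for k,v in dic.items():
--         if v == vmax:
--             cls.append([k,dic2[k][1]])
--     return cls
-- ===== SOURCE B (Python) =====
-- def mostPopularCreator(creators, ids, views):
--     # group pass: creator -> list of (views, id) records, in input order
--     groups = {}
--     for c, i, v in zip(creators, ids, views):
--         groups.setdefault(c, []).append((v, i))
--     # aggregate pass: creator -> (total views, best id = smallest id among max-view records)
--     stats = {}
--     for c, recs in groups.items():
--         mv = max(v for v, _ in recs)
--         stats[c] = (sum(v for v, _ in recs), min(i for v, i in recs if v == mv))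
--     vmax = max(t for t, _ in stats.values())
--     return [[c, b] for c, (t, b) in stats.items() if t == vmax]
-- ===== Notes on version B (the rewrite author's own statement) =====
-- stated objective: alternative
-- what changed: A aggregates totals and best records incrementally in one indexed loop over two dicts; B first groups raw (views, id) records per creator with zip, then computes each creator's total as a sum and its best id as a min over the max-view records in a separate aggregation pass.
import Mathlib
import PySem

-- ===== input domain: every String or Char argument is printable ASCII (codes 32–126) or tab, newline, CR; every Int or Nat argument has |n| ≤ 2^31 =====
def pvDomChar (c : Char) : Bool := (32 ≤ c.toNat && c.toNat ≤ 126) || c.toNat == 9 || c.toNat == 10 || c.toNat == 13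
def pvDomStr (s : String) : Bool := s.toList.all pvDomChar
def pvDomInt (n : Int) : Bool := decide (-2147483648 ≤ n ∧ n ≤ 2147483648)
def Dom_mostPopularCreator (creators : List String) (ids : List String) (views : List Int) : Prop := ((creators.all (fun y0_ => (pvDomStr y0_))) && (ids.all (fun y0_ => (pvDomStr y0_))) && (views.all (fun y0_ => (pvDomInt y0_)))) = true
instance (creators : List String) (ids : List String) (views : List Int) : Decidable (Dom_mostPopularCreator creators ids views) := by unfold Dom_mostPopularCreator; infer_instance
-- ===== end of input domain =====

-- B replaces A's incremental per-creator aggregation with a group-then-aggregate decomposition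
-- (grouping dict of raw records, then totals / best ids computed per group); objective: alternative.


-- ===== PORT A =====
def mostPopularCreator (creators : List String) (ids : List String) (views : List Int) : List (List String) :=
  let n : Int := PySem.List.len creators
  let p := (PySem.List.pyRange 0 n).foldl
    (fun (st : PySem.Dict String Int × PySem.Dict String (Int × String)) i =>
      let c := PySem.List.pyGetD creators i ""
      let idv := PySem.List.pyGetD ids i ""
      let v := PySem.List.pyGetD views i 0
      ( st.1.modify c 0 (fun x => x + v),
        if st.2.contains c = false then st.2.insert c (v, idv)
        else
          let cur := st.2.getD c (0, "")
          if cur.1 < v then st.2.insert c (v, idv)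
          else if cur.1 = v ∧ cur.2 > idv then st.2.insert c (v, idv)
          else st.2 ))
    (PySem.Dict.empty, PySem.Dict.empty)
  match PySem.List.max? p.1.values (fun x => x) with
  | none => []  -- Python: max() over the empty dict raises ValueError; excluded by Pre_
  | some vmax =>
      p.1.items.foldl
        (fun cls kv => if kv.2 = vmax then cls ++ [[kv.1, (p.2.getD kv.1 (0, "")).2]] else cls)
        []

-- ===== PORT B =====
def mostPopularCreator_alt (creators : List String) (ids : List String) (views : List Int) : List (List String) :=
  let groups := (creators.zip (ids.zip views)).foldl
    (fun (g : PySem.Dict String (List (Int × String))) t =>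
      g.insert t.1 (g.getD t.1 [] ++ [(t.2.2, t.2.1)]))
    PySem.Dict.empty
  let stats := groups.items.foldl
    (fun (d : PySem.Dict String (Int × String)) p =>
      let mv := (PySem.List.max? (p.2.map (fun r => r.1)) (fun x => x)).getD 0
      d.insert p.1
        ( (p.2.map (fun r => r.1)).sum,
          (PySem.List.min? ((p.2.filter (fun r => r.1 == mv)).map (fun r => r.2)) (fun x => x)).getD "" ))
    PySem.Dict.empty
  match PySem.List.max? (stats.values.map (fun q => q.1)) (fun x => x) with
  | none => []  -- Python: max() over the empty generator raises ValueError; excluded by Pre_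
  | some vmax =>
      (stats.items.filter (fun q => q.2.1 == vmax)).map (fun q => [q.1, q.2.2])

-- ===== PRECONDITION & SPEC =====
-- Pre_ excludes exactly the inputs where the Python A raises: an empty creators list
-- (ValueError from max over an empty dict) and ids/views shorter than creators (IndexError).
def Pre_mostPopularCreator (creators : List String) (ids : List String) (views : List Int) : Prop :=
  creators ≠ [] ∧ creators.length ≤ ids.length ∧ creators.length ≤ views.length
instance (creators : List String) (ids : List String) (views : List Int) : Decidable (Pre_mostPopularCreator creators ids views) := by unfold Pre_mostPopularCreator; infer_instance
def pvWitness_mostPopularCreator : List String × List String × List Int :=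
  (["a", "b", "a"], ["x2", "y1", "x1"], [3, 5, 2])

def Spec_mostPopularCreator (creators : List String) (ids : List String) (views : List Int) (out : List (List String)) : Prop := out = mostPopularCreator_alt creators ids views
instance (creators : List String) (ids : List String) (views : List Int) (out : List (List String)) : Decidable (Spec_mostPopularCreator creators ids views out) := by unfold Spec_mostPopularCreator; infer_instance

-- ===== CLAIM (what is proved, stated in full; the proofs are below) =====
def Claim_equal_mostPopularCreator : Prop := ∀ (creators : List String) (ids : List String) (views : List Int), Dom_mostPopularCreator creators ids views → Pre_mostPopularCreator creators ids views → Spec_mostPopularCreator creators ids views (mostPopularCreator creators ids views)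
-- ===== LEMMAS AND PROOFS =====

-- the canonical record list: one (creator, (views, id)) triple per index
def pvTriples (creators : List String) (ids : List String) (views : List Int) : List (String × Int × String) :=
  (creators.zip (ids.zip views)).map (fun t => (t.1, (t.2.2, t.2.1)))

-- A's tournament step on a creator's current best record vs a new record
def pvStep (m r : Int × String) : Int × String :=
  if m.1 < r.1 then r else if m.1 = r.1 ∧ r.2 < m.2 then r else m

def pvStepA2 (d : PySem.Dict String (Int × String)) (t : String × Int × String) :
    PySem.Dict String (Int × String) :=
  if d.contains t.1 = false then d.insert t.1 t.2
  else
    let cur := d.getD t.1 (0, "")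
    if cur.1 < t.2.1 then d.insert t.1 t.2
    else if cur.1 = t.2.1 ∧ cur.2 > t.2.2 then d.insert t.1 t.2
    else d

def pvBopt (o : Option (Int × String)) (rs : List (Int × String)) : Option (Int × String) :=
  rs.foldl (fun o r => match o with | none => some r | some m => some (pvStep m r)) o

-- the two dictionaries A builds and the grouping dictionary B builds, over the triple list
def pvD1 (l : List (String × Int × String)) : PySem.Dict String Int :=
  l.foldl (fun d t => d.modify t.1 0 (fun x => x + t.2.1)) PySem.Dict.empty

def pvD2 (l : List (String × Int × String)) : PySem.Dict String (Int × String) :=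
  l.foldl pvStepA2 PySem.Dict.empty

def pvG (l : List (String × Int × String)) : PySem.Dict String (List (Int × String)) :=
  l.foldl (fun g t => g.modify t.1 [] (fun x => x ++ [t.2])) PySem.Dict.empty

lemma pv_contains_iff (d : PySem.Dict String (Int × String)) (k : String) :
    d.contains k = true ↔ ∃ v, d.get? k = some v := by
  rw [PySem.Dict.contains, PySem.Dict.get?, List.any_eq_true]
  constructor
  · rintro ⟨p, hp, hpk⟩
    have h := List.find?_isSome (xs := d.items) (p := fun q => q.1 == k) |>.mpr ⟨p, hp, hpk⟩
    rcases Option.isSome_iff_exists.mp h with ⟨q, hq⟩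
    exact ⟨q.2, by simp [hq]⟩
  · rintro ⟨v, hv⟩
    rcases Option.map_eq_some_iff.mp hv with ⟨q, hq, -⟩
    exact ⟨q, List.mem_of_find?_eq_some hq, by simpa using List.find?_eq_some_iff_append.mp hq |>.1⟩

lemma pv_map_range (creators ids : List String) (views : List Int)
    (h1 : creators.length ≤ ids.length) (h2 : creators.length ≤ views.length) :
    (PySem.List.pyRange 0 (PySem.List.len creators)).map
      (fun i => ((PySem.List.pyGetD creators i "",
        (PySem.List.pyGetD views i 0, PySem.List.pyGetD ids i "")) : String × Int × String))
    = pvTriples creators ids views := by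
  rw [PySem.List.len, PySem.List.pyRange_zero_natCast, List.map_map]
  apply List.ext_getElem
  · simp [pvTriples]; omega
  · intro j hj hj'
    simp only [List.getElem_map, List.getElem_range, Function.comp,
      PySem.List.pyGetD_natCast, pvTriples, List.getElem_zip]
    have hjc : j < creators.length := by simpa using hj
    simp [List.getD_eq_getElem?_getD, List.getElem?_eq_getElem, hjc,
      show j < ids.length by omega, show j < views.length by omega]

lemma pv_dic1_getD (l : List (String × Int × String)) (d : PySem.Dict String Int) (c : String) :
    (l.foldl (fun d t => d.modify t.1 0 (fun x => x + t.2.1)) d).getD c 0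
    = d.getD c 0 + ((l.filter (fun t => t.1 == c)).map (fun t => t.2.1)).sum := by
  induction l generalizing d with
  | nil => simp
  | cons t l ih =>
    rw [List.foldl_cons, ih, List.filter_cons]
    by_cases h : t.1 = c
    · simp [h, PySem.Dict.modify, PySem.Dict.getD_insert]; ring
    · simp [h, PySem.Dict.modify, PySem.Dict.getD_insert, Ne.symm h]

lemma pv_step1 (d : PySem.Dict String (Int × String)) (t : String × Int × String) :
    (pvStepA2 d t).get? t.1
    = some (match d.get? t.1 with | none => t.2 | some m => pvStep m t.2) := by
  rcases hc : d.get? t.1 with - | m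
  · have hcf : d.contains t.1 = false := by
      rcases h : d.contains t.1 with - | -
      · rfl
      · rcases (pv_contains_iff d t.1).mp h with ⟨v, hv⟩; rw [hv] at hc; cases hc
    simp [pvStepA2, hcf, PySem.Dict.get?_insert_self]
  · have hct : d.contains t.1 = true := (pv_contains_iff d t.1).mpr ⟨m, hc⟩
    have hgd : d.getD t.1 (0, "") = m := by simp [PySem.Dict.getD, hc]
    simp only [pvStepA2, hct, Bool.true_eq_false, if_false, hgd, pvStep, gt_iff_lt]
    split_ifs with h1 h2
    · exact PySem.Dict.get?_insert_self d t.1 t.2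
    · exact PySem.Dict.get?_insert_self d t.1 t.2
    · exact hc

lemma pv_dic2_get? (l : List (String × Int × String)) (d : PySem.Dict String (Int × String)) (c : String) :
    (l.foldl pvStepA2 d).get? c
    = pvBopt (d.get? c) ((l.filter (fun t => t.1 == c)).map (fun t => t.2)) := by
  induction l generalizing d with
  | nil => simp [pvBopt]
  | cons t l ih =>
    rw [List.foldl_cons, ih, List.filter_cons]
    by_cases h : t.1 = c
    · subst h
      rw [pv_step1]
      simp only [BEq.rfl, if_true, List.map_cons, pvBopt, List.foldl_cons]
      rcases d.get? t.1 with - | m <;> rfl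
    · have hne : c ≠ t.1 := fun hh => h hh.symm
      have : (pvStepA2 d t).get? c = d.get? c := by
        dsimp only [pvStepA2]
        split_ifs <;> first
          | exact PySem.Dict.get?_insert_of_ne _ _ hne
          | rfl
      simp [h, this]

lemma pv_bopt_some (m : Int × String) (rs : List (Int × String)) :
    pvBopt (some m) rs = some (rs.foldl pvStep m) := by
  induction rs generalizing m with
  | nil => rfl
  | cons r rs ih => simpa [pvBopt, List.foldl_cons] using ih (pvStep m r)

lemma pv_step_cases (m r : Int × String) : pvStep m r = m ∨ pvStep m r = r := by
  rw [pvStep]; split_ifs <;> simp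

lemma pv_step_fst_left (m r : Int × String) : m.1 ≤ (pvStep m r).1 := by
  rw [pvStep]; split_ifs with h1 h2
  · exact h1.le
  · exact h2.1.le
  · exact le_refl _
lemma pv_step_fst_right (m r : Int × String) : r.1 ≤ (pvStep m r).1 := by
  rw [pvStep]; split_ifs with h1 h2
  · exact le_refl _
  · exact le_refl _
  · exact not_lt.mp h1
lemma pv_step_snd_left (m r : Int × String) : m.1 = (pvStep m r).1 → (pvStep m r).2 ≤ m.2 := by
  rw [pvStep]; split_ifs with h1 h2 <;> intro he
  · exact absurd (he ▸ h1) (lt_irrefl _)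
  · exact h2.2.le
  · exact le_refl _
lemma pv_step_snd_right (m r : Int × String) : r.1 = (pvStep m r).1 → (pvStep m r).2 ≤ r.2 := by
  rw [pvStep]; split_ifs with h1 h2 <;> intro he
  · exact le_refl _
  · exact le_refl _
  · exact not_lt.mp (fun hc => h2 ⟨he.symm, hc⟩)

lemma pv_fold_spec (r : Int × String) (rs : List (Int × String)) :
    rs.foldl pvStep r ∈ r :: rs
    ∧ (∀ q ∈ r :: rs, q.1 ≤ (rs.foldl pvStep r).1)
    ∧ (∀ q ∈ r :: rs, q.1 = (rs.foldl pvStep r).1 → (rs.foldl pvStep r).2 ≤ q.2) := by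
  induction rs generalizing r with
  | nil => simp
  | cons x rs ih =>
    rcases ih (pvStep r x) with ⟨hmem, hmax, hmin⟩
    rw [List.foldl_cons]
    have hsub : ∀ q ∈ r :: x :: rs, q.1 ≤ (rs.foldl pvStep (pvStep r x)).1 := by
      intro q hq
      rcases List.mem_cons.mp hq with rfl | hq
      · exact le_trans (pv_step_fst_left q x) (hmax _ (List.mem_cons_self))
      · rcases List.mem_cons.mp hq with rfl | hq
        · exact le_trans (pv_step_fst_right r q) (hmax _ (List.mem_cons_self))
        · exact hmax _ (List.mem_cons_of_mem _ hq)
    refine ⟨?_, hsub, ?_⟩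
    · rcases List.mem_cons.mp hmem with hm | hm
      · rcases pv_step_cases r x with hc | hc <;> rw [hm, hc]
        · exact List.mem_cons_self
        · exact List.mem_cons_of_mem _ List.mem_cons_self
      · exact List.mem_cons_of_mem _ (List.mem_cons_of_mem _ hm)
    · intro q hq he
      rcases List.mem_cons.mp hq with rfl | hq
      · have h1 : q.1 ≤ (pvStep q x).1 := pv_step_fst_left q x
        have h2 : (pvStep q x).1 ≤ (rs.foldl pvStep (pvStep q x)).1 := hmax _ List.mem_cons_self
        have hse : (pvStep q x).1 = (rs.foldl pvStep (pvStep q x)).1 :=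
          le_antisymm h2 (he ▸ (he ▸ h1 : _))
        exact le_trans (hmin _ List.mem_cons_self hse)
          (pv_step_snd_left q x (by rw [← hse] at he; exact he))
      · rcases List.mem_cons.mp hq with rfl | hq
        · have h1 : q.1 ≤ (pvStep r q).1 := pv_step_fst_right r q
          have h2 : (pvStep r q).1 ≤ (rs.foldl pvStep (pvStep r q)).1 := hmax _ List.mem_cons_self
          have hse : (pvStep r q).1 = (rs.foldl pvStep (pvStep r q)).1 :=
            le_antisymm h2 (he ▸ (he ▸ h1 : _))
          exact le_trans (hmin _ List.mem_cons_self hse)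
            (pv_step_snd_right r q (by rw [← hse] at he; exact he))
        · exact hmin _ (List.mem_cons_of_mem _ hq) he

lemma pv_best_eq (r : Int × String) (rs : List (Int × String)) :
    (PySem.List.max? ((r :: rs).map (fun q => q.1)) (fun x => x)).getD 0 = (rs.foldl pvStep r).1
    ∧ (PySem.List.min? (((r :: rs).filter (fun q => q.1 == (rs.foldl pvStep r).1)).map (fun q => q.2))
        (fun x => x)).getD "" = (rs.foldl pvStep r).2 := by
  obtain ⟨hmem, hmax, hmin⟩ := pv_fold_spec r rs
  set p := rs.foldl pvStep r with hp
  constructor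
  · rcases hM : PySem.List.max? ((r :: rs).map (fun q => q.1)) (fun x => x) with - | M
    · rw [PySem.List.max?_eq_none_iff] at hM
      simp at hM
    · rcases List.mem_map.mp (PySem.List.max?_mem hM) with ⟨q, hq, rfl⟩
      have h1 : q.1 ≤ p.1 := hmax q hq
      have h2 : p.1 ≤ q.1 := PySem.List.max?_isMax hM p.1 (List.mem_map_of_mem hmem)
      rw [List.map_cons] at hM ⊢
      rw [hM, Option.getD_some]
      exact le_antisymm h1 h2
  · rcases hm : PySem.List.min? (((r :: rs).filter (fun q => q.1 == p.1)).map (fun q => q.2))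
        (fun x => x) with - | m
    · rw [PySem.List.min?_eq_none_iff] at hm
      exfalso
      have : p.2 ∈ (((r :: rs).filter (fun q => q.1 == p.1)).map (fun q => q.2)) :=
        List.mem_map_of_mem (List.mem_filter.mpr ⟨hmem, by simp⟩)
      rw [hm] at this; simp at this
    · have hpmem : p.2 ∈ (((r :: rs).filter (fun q => q.1 == p.1)).map (fun q => q.2)) :=
        List.mem_map_of_mem (List.mem_filter.mpr ⟨hmem, by simp⟩)
      have h1 : m ≤ p.2 := PySem.List.min?_id_le hm p.2 hpmem
      rcases List.mem_map.mp (PySem.List.min?_mem hm) with ⟨q, hq, rfl⟩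
      rcases List.mem_filter.mp hq with ⟨hqm, hqe⟩
      have h2 : p.2 ≤ q.2 := hmin q hqm (by simpa using hqe)
      rw [hm, Option.getD_some]
      exact le_antisymm h1 h2


-- B's per-group aggregate value
def pvVal (recs : List (Int × String)) : Int × String :=
  ( (recs.map (fun r => r.1)).sum,
    (PySem.List.min? ((recs.filter (fun r =>
        r.1 == (PySem.List.max? (recs.map (fun r => r.1)) (fun x => x)).getD 0)).map
      (fun r => r.2)) (fun x => x)).getD "" )

lemma pv_val_eq (r : Int × String) (rs : List (Int × String)) :
    pvVal (r :: rs) = (((r :: rs).map (fun q => q.1)).sum, (rs.foldl pvStep r).2) := by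
  obtain ⟨hfst, hsnd⟩ := pv_best_eq r rs
  rw [pvVal, hfst, hsnd]

lemma pv_keys1 (l : List (String × Int × String)) :
    (pvD1 l).keys = PySem.Set.ofList (l.map (fun t => t.1)) :=
  PySem.Dict.keys_foldl_modify_key l (fun t => t.1) 0 (fun _ t x => x + t.2.1) PySem.Dict.empty

lemma pv_keysG (l : List (String × Int × String)) :
    (pvG l).keys = PySem.Set.ofList (l.map (fun t => t.1)) :=
  PySem.Dict.keys_foldl_modify_key l (fun t => t.1) [] (fun _ t x => x ++ [t.2]) PySem.Dict.empty

lemma pv_nodup1 (l : List (String × Int × String)) : (pvD1 l).keys.Nodup :=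
  PySem.Dict.nodup_keys_foldl_modify_key l (fun t => t.1) 0 (fun _ t x => x + t.2.1) PySem.Dict.empty (by simp [PySem.Dict.keys, PySem.Dict.empty])

lemma pv_nodupG (l : List (String × Int × String)) : (pvG l).keys.Nodup :=
  PySem.Dict.nodup_keys_foldl_modify_key l (fun t => t.1) [] (fun _ t x => x ++ [t.2]) PySem.Dict.empty (by simp [PySem.Dict.keys, PySem.Dict.empty])

lemma pv_groups_getD (l : List (String × Int × String)) (c : String) :
    (pvG l).getD c [] = (l.filter (fun t => t.1 == c)).map (fun t => t.2) := by
  simpa using PySem.Dict.getD_foldl_modify_append l PySem.Dict.empty c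

lemma pv_best_getD (l : List (String × Int × String)) (k : String)
    (hk : k ∈ PySem.Set.ofList (l.map (fun t => t.1))) :
    ((pvD2 l).getD k (0, "")).2 = (pvVal ((pvG l).getD k [])).2 := by
  have hkm : k ∈ l.map (fun t => t.1) := (PySem.Set.mem_ofList _ _).mp hk
  rcases List.mem_map.mp hkm with ⟨t, ht, rfl⟩
  have hne : (l.filter (fun q => q.1 == t.1)).map (fun q => q.2) ≠ [] := by
    have : t ∈ l.filter (fun q => q.1 == t.1) := List.mem_filter.mpr ⟨ht, by simp⟩
    intro hc
    rw [List.map_eq_nil_iff] at hc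
    rw [hc] at this
    simp at this
  rw [pv_groups_getD]
  rcases hr : (l.filter (fun q => q.1 == t.1)).map (fun q => q.2) with - | ⟨r, rs⟩
  · exact absurd hr hne
  · have hA : (pvD2 l).get? t.1 = pvBopt none (r :: rs) := by
      have := pv_dic2_get? l PySem.Dict.empty t.1
      rw [hr] at this
      simpa [pvD2] using this
    have hA2 : (pvD2 l).get? t.1 = some (rs.foldl pvStep r) := by
      rw [hA, show pvBopt none (r :: rs) = pvBopt (some r) rs from rfl, pv_bopt_some]
    rw [PySem.Dict.getD, hA2, Option.getD_some, hr, pv_val_eq]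

lemma pv_out_eq (l : List (String × Int × String)) :
    (match PySem.List.max? (pvD1 l).values (fun x => x) with
     | none => ([] : List (List String))
     | some vmax =>
        (pvD1 l).items.foldl
          (fun (cls : List (List String)) (kv : String × Int) =>
            if kv.2 = vmax then cls ++ [[kv.1, ((pvD2 l).getD kv.1 (0, "")).2]] else cls) [])
    = (match PySem.List.max?
          ((((pvG l).items.foldl
              (fun (d : PySem.Dict String (Int × String)) (p : String × List (Int × String)) =>
                d.insert p.1 (pvVal p.2)) PySem.Dict.empty).values).map
            (fun q => q.1)) (fun x => x) with
       | none => ([] : List (List String))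
       | some vmax =>
          (((pvG l).items.foldl
              (fun (d : PySem.Dict String (Int × String)) (p : String × List (Int × String)) =>
                d.insert p.1 (pvVal p.2)) PySem.Dict.empty).items.filter
            (fun q => q.2.1 == vmax)).map (fun q => [q.1, q.2.2])) := by
  have hstats : ((pvG l).items.foldl
      (fun (d : PySem.Dict String (Int × String)) (p : String × List (Int × String)) =>
        d.insert p.1 (pvVal p.2)) PySem.Dict.empty).items
      = (pvG l).items.map (fun p => (p.1, pvVal p.2)) := by
    simpa using PySem.Dict.items_foldl_insert_fresh (pvG l).items (fun p => p.1)
      (fun p => pvVal p.2) PySem.Dict.empty (fun a _ => rfl) (pv_nodupG l)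
  have hTot : ∀ c, (pvD1 l).getD c 0 = ((l.filter (fun t => t.1 == c)).map (fun t => t.2.1)).sum :=
    fun c => by simpa [pvD1] using pv_dic1_getD l PySem.Dict.empty c
  have hitems1 : (pvD1 l).items
      = (PySem.Set.ofList (l.map (fun t => t.1))).map (fun k => (k, (pvD1 l).getD k 0)) := by
    rw [← pv_keys1 l]; exact PySem.Dict.items_eq_map_keys _ (pv_nodup1 l) 0
  have hitemsG : (pvG l).items
      = (PySem.Set.ofList (l.map (fun t => t.1))).map (fun k => (k, (pvG l).getD k [])) := by
    rw [← pv_keysG l]; exact PySem.Dict.items_eq_map_keys _ (pv_nodupG l) []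
  have hvalfst : ∀ k, (pvVal ((pvG l).getD k [])).1 = (pvD1 l).getD k 0 := by
    intro k
    rw [pv_groups_getD, hTot, pvVal, List.map_map]
    rfl
  have hvals : (((pvG l).items.foldl
      (fun (d : PySem.Dict String (Int × String)) (p : String × List (Int × String)) =>
        d.insert p.1 (pvVal p.2)) PySem.Dict.empty).values).map (fun q => q.1)
      = (pvD1 l).values := by
    rw [PySem.Dict.values, PySem.Dict.values, hstats, hitemsG, hitems1]
    simp only [List.map_map]
    exact List.map_congr_left (fun k _ => hvalfst k)
  rw [hvals]
  rcases hmax : PySem.List.max? (pvD1 l).values (fun x => x) with - | vmax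
  · rfl
  · have hA : (pvD1 l).items.foldl
        (fun (cls : List (List String)) (kv : String × Int) =>
          if kv.2 = vmax then cls ++ [[kv.1, ((pvD2 l).getD kv.1 (0, "")).2]] else cls) []
        = ((pvD1 l).items.filter (fun kv => kv.2 == vmax)).map
            (fun kv => [kv.1, ((pvD2 l).getD kv.1 (0, "")).2]) := by
      simpa [beq_iff_eq] using PySem.List.foldl_append_if
        (fun (kv : String × Int) => kv.2 == vmax)
        (fun kv => [kv.1, ((pvD2 l).getD kv.1 (0, "")).2]) (pvD1 l).items []
    dsimp only
    rw [hA, hstats, hitemsG, hitems1, List.filter_map, List.filter_map, List.filter_map,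
      List.map_map, List.map_map, List.map_map]
    have hcond : (PySem.Set.ofList (l.map (fun t => t.1))).filter
          (((fun (q : String × Int × String) => q.2.1 == vmax) ∘
            (fun p => (p.1, pvVal p.2))) ∘ fun k => (k, (pvG l).getD k []))
        = (PySem.Set.ofList (l.map (fun t => t.1))).filter
          ((fun (kv : String × Int) => kv.2 == vmax) ∘ fun k => (k, (pvD1 l).getD k 0)) := by
      refine List.filter_congr (fun k _ => ?_)
      simp only [Function.comp]
      rw [hvalfst k]
    rw [hcond]
    refine List.map_congr_left (fun k hkf => ?_)
    have hk : k ∈ PySem.Set.ofList (l.map (fun t => t.1)) := (List.mem_filter.mp hkf).1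
    simp only [Function.comp]
    rw [pv_best_getD l k hk]

theorem pv_main (creators ids : List String) (views : List Int)
    (h1 : creators.length ≤ ids.length) (h2 : creators.length ≤ views.length) :
    mostPopularCreator creators ids views = mostPopularCreator_alt creators ids views := by
  have hfoldA : (PySem.List.pyRange 0 (PySem.List.len creators)).foldl
      (fun (st : PySem.Dict String Int × PySem.Dict String (Int × String)) i =>
        let c := PySem.List.pyGetD creators i ""
        let idv := PySem.List.pyGetD ids i ""
        let v := PySem.List.pyGetD views i 0
        ( st.1.modify c 0 (fun x => x + v),
          if st.2.contains c = false then st.2.insert c (v, idv)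
          else
            let cur := st.2.getD c (0, "")
            if cur.1 < v then st.2.insert c (v, idv)
            else if cur.1 = v ∧ cur.2 > idv then st.2.insert c (v, idv)
            else st.2 ))
      (PySem.Dict.empty, PySem.Dict.empty)
      = (pvD1 (pvTriples creators ids views), pvD2 (pvTriples creators ids views)) := by
    have e3 : (PySem.List.pyRange 0 (PySem.List.len creators)).foldl
        (fun (st : PySem.Dict String Int × PySem.Dict String (Int × String)) i =>
          let c := PySem.List.pyGetD creators i ""
          let idv := PySem.List.pyGetD ids i ""
          let v := PySem.List.pyGetD views i 0
          ( st.1.modify c 0 (fun x => x + v),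
            if st.2.contains c = false then st.2.insert c (v, idv)
            else
              let cur := st.2.getD c (0, "")
              if cur.1 < v then st.2.insert c (v, idv)
              else if cur.1 = v ∧ cur.2 > idv then st.2.insert c (v, idv)
              else st.2 ))
        (PySem.Dict.empty, PySem.Dict.empty)
        = (pvTriples creators ids views).foldl
          (fun (st : PySem.Dict String Int × PySem.Dict String (Int × String)) t =>
            (st.1.modify t.1 0 (fun x => x + t.2.1), pvStepA2 st.2 t))
          (PySem.Dict.empty, PySem.Dict.empty) := by
      rw [← pv_map_range creators ids views h1 h2, List.foldl_map]
      rfl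
    rw [e3]
    exact PySem.List.foldl_prod_mk (fun d t => d.modify t.1 0 (fun x => x + t.2.1)) pvStepA2
      (pvTriples creators ids views) PySem.Dict.empty PySem.Dict.empty
  have hfoldB : (creators.zip (ids.zip views)).foldl
      (fun (g : PySem.Dict String (List (Int × String))) t =>
        g.insert t.1 (g.getD t.1 [] ++ [(t.2.2, t.2.1)]))
      PySem.Dict.empty = pvG (pvTriples creators ids views) := by
    rw [pvG, pvTriples, List.foldl_map]
    rfl
  unfold mostPopularCreator mostPopularCreator_alt
  simp only [hfoldA, hfoldB]
  exact pv_out_eq (pvTriples creators ids views)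

-- ===== VERDICT (by name: the statement is the Claim_ definition above) =====
theorem mostPopularCreator_spec : Claim_equal_mostPopularCreator := by
  intro creators ids views _ hpre
  exact pv_main creators ids views hpre.2.1 hpre.2.2
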